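-- pv_equiv track=rewrite | github.com/subinacls/Para | Server/modules/security/monitor/auth_log.py | port_parser
-- ===== SOURCE A (Python) =====
-- def port_parser(parsed_string):
--     smallest = 66000
--     largest = -1
--     counter = 0
--     for port in parsed_string.split("|"):
--         if len(port) > 0:
--             if int(port) < smallest:
--                 smallest = int(port)
--             if int(port) > largest:
--                 largest = int(port)
--             counter = counter + 1
--     return largest, smallest, counter
-- ===== SOURCE B (Python) =====
-- def port_parser(parsed_string):
--     ports = sorted(int(p) for p in parsed_string.split("|") if p)
--     if not ports:
--         return -1, 66000, 0
--     return ports[-1], ports[0], len(ports)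
-- ===== Notes on version B (the rewrite author's own statement) =====
-- stated objective: alternative
-- what changed: Replaces A's single pass with three mutable accumulators and comparison branches by sort-then-endpoints: parse the non-empty tokens, sort them once, and read the largest and smallest off the ends of the sorted list.
-- intended difference: On inputs whose non-empty tokens all parse below -1 (or all above 66000), A's sentinel seeds clamp the reported largest to -1 (resp. smallest to 66000) instead of the actual extreme; B returns the true maximum and minimum of the parsed ports, which is what the function is for. — e.g. on port_parser("70000"): A returns (70000, 66000, 1), B returns (70000, 70000, 1)
import Mathlib
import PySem

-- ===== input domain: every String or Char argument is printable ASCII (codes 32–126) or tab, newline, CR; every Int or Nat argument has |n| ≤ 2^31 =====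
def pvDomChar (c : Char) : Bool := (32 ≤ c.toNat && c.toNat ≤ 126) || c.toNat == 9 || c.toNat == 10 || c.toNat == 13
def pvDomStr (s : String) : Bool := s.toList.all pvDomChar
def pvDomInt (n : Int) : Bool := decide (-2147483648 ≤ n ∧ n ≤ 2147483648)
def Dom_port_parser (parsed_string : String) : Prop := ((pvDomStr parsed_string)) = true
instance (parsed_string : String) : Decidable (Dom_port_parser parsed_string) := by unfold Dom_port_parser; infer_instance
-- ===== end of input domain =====

-- B replaces A's one-pass accumulator loop by sort-then-endpoints (alternative algorithm);
-- B reports the true extremes where A's sentinel seeds clamp them (see D_ below).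

-- ===== PORT A =====
-- literal port of A: one fold carrying (smallest, largest, counter); int(port) is
-- PySem.Int.ofChars?, totalised with getD 0 (Pre_ guarantees it is some on non-empty tokens)
def port_parser (parsed_string : String) : Int × Int × Int :=
  let r := (PySem.Chars.splitOn parsed_string.toList ['|']).foldl
    (fun (st : Int × Int × Int) port =>
      if 0 < port.length then
        let v := (PySem.Int.ofChars? port).getD 0
        let smallest := if v < st.1 then v else st.1
        let largest := if v > st.2.1 then v else st.2.1
        (smallest, largest, st.2.2 + 1)
      else st)
    (66000, -1, 0)
  (r.2.1, r.1, r.2.2)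

-- ===== PORT B =====
-- literal port of Source B: parse non-empty tokens, sort once, read the endpoints
def port_parser_alt (parsed_string : String) : Int × Int × Int :=
  let ports := PySem.List.sorted
    (((PySem.Chars.splitOn parsed_string.toList ['|']).filter (fun p => p ≠ [])).map
      (fun p => (PySem.Int.ofChars? p).getD 0)) (fun x => x) false
  if ports = [] then (-1, 66000, 0)
  else ((PySem.List.pyGet? ports (-1)).getD 0, (PySem.List.pyGet? ports 0).getD 0,
        (ports.length : Int))

-- ===== PRECONDITION & SPEC =====
-- Pre_ excludes exactly the inputs where Python's int(port) raises ValueError on a non-empty token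
def Pre_port_parser (parsed_string : String) : Prop :=
  ∀ t ∈ PySem.Chars.splitOn parsed_string.toList ['|'], t ≠ [] → (PySem.Int.ofChars? t).isSome = true
instance (parsed_string : String) : Decidable (Pre_port_parser parsed_string) := by unfold Pre_port_parser; infer_instance
def pvWitness_port_parser : String := "80|443| 7 |"

-- On inputs that have a non-empty token and whose non-empty tokens all parse below -1
-- (or all above 66000), A's sentinel seeds clamp the reported largest to -1 (resp. smallest
-- to 66000) instead of the actual extreme; B returns the true maximum and minimum of the
-- parsed ports, which is what the function is for.
def pvVals (s : String) : List Int :=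
  ((PySem.Str.split? s "|").getD []).filterMap PySem.Int.ofStr?
def D_port_parser (parsed_string : String) : Prop :=
  pvVals parsed_string ≠ [] ∧
    ((∀ v ∈ pvVals parsed_string, v < -1) ∨ (∀ v ∈ pvVals parsed_string, 66000 < v))
instance (parsed_string : String) : Decidable (D_port_parser parsed_string) := by unfold D_port_parser; infer_instance

def Spec_port_parser (parsed_string : String) (out : Int × Int × Int) : Prop :=
  ¬ D_port_parser parsed_string → out = port_parser_alt parsed_string
instance (parsed_string : String) (out : Int × Int × Int) : Decidable (Spec_port_parser parsed_string out) := by unfold Spec_port_parser; infer_instance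

def pvDiffWitness_port_parser : String := "70000"
def pvDiffWitnessOut_port_parser : (Int × Int × Int) × (Int × Int × Int) :=
  ((70000, 66000, 1), (70000, 70000, 1))

-- ===== CLAIM (what is proved, stated in full; the proofs are below) =====
def Claim_unchanged_port_parser : Prop := ∀ (parsed_string : String), Dom_port_parser parsed_string → Pre_port_parser parsed_string → Spec_port_parser parsed_string (port_parser parsed_string)
def Claim_changed_port_parser : Prop := Dom_port_parser (pvDiffWitness_port_parser) ∧ Pre_port_parser (pvDiffWitness_port_parser) ∧ D_port_parser (pvDiffWitness_port_parser) ∧ port_parser (pvDiffWitness_port_parser) = pvDiffWitnessOut_port_parser.1 ∧ port_parser_alt (pvDiffWitness_port_parser) = pvDiffWitnessOut_port_parser.2 ∧ pvDiffWitnessOut_port_parser.1 ≠ pvDiffWitnessOut_port_parser.2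
def Claim_exact_port_parser : Prop := ∀ (parsed_string : String), Dom_port_parser parsed_string → Pre_port_parser parsed_string → D_port_parser parsed_string → port_parser parsed_string ≠ port_parser_alt parsed_string

-- ===== LEMMAS AND PROOFS =====

-- proof-side helper: the parsed values of the non-empty tokens
def pvPortVals (s : String) : List Int :=
  ((PySem.Chars.splitOn s.toList ['|']).filter (fun p => p ≠ [])).map
    (fun p => (PySem.Int.ofChars? p).getD 0)

-- pvVals at the String level equals the token-level filterMap
theorem pvVals_eq_chars (s : String) :
    pvVals s = (PySem.Chars.splitOn s.toList ['|']).filterMap PySem.Int.ofChars? := by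
  unfold pvVals
  have hch : PySem.Chars.split? s.toList "|".toList
      = some (PySem.Chars.splitOn s.toList "|".toList) := by
    simp [PySem.Chars.split?]
  have h := PySem.Str.split?_map s "|"
  rw [hch] at h
  obtain ⟨ts, hts, hmap⟩ := Option.map_eq_some_iff.mp h
  rw [hts]
  simp only [Option.getD_some]
  have hpipe : "|".toList = ['|'] := rfl
  rw [← hpipe, ← hmap, List.filterMap_map]
  rfl

-- under Pre_, the token-level filterMap is exactly the parsed-value list of the non-empty tokens
theorem pvVals_eq (l : List (List Char))
    (h : ∀ t ∈ l, t ≠ [] → (PySem.Int.ofChars? t).isSome = true) :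
    l.filterMap PySem.Int.ofChars?
      = (l.filter (fun p => p ≠ [])).map (fun p => (PySem.Int.ofChars? p).getD 0) := by
  induction l with
  | nil => rfl
  | cons a l ih =>
    have ih' := ih (fun t ht => h t (List.mem_cons_of_mem _ ht))
    by_cases ha : a = []
    · subst ha
      have hnone : PySem.Int.ofChars? ([] : List Char) = none := rfl
      simp [hnone, ih']
    · obtain ⟨w, hw⟩ := Option.isSome_iff_exists.mp (h a List.mem_cons_self ha)
      simp [hw, ha, ih']

theorem D_iff (s : String) (hpre : Pre_port_parser s) :
    D_port_parser s ↔ (pvPortVals s ≠ [] ∧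
      ((∀ v ∈ pvPortVals s, v < -1) ∨ (∀ v ∈ pvPortVals s, 66000 < v))) := by
  unfold D_port_parser
  rw [pvVals_eq_chars, pvVals_eq _ hpre]
  rfl

-- foldl min lands in the seed-or-list
theorem foldl_min_mem (L : List Int) : ∀ c : Int, L.foldl min c ∈ c :: L := by
  induction L with
  | nil => intro c; simp
  | cons a L ih =>
    intro c
    rcases List.mem_cons.mp (ih (min c a)) with h | h
    · rw [List.foldl_cons, h]
      rcases min_choice c a with hc | hc <;> rw [hc] <;> simp
    · rw [List.foldl_cons]
      exact List.mem_cons_of_mem _ (List.mem_cons_of_mem _ h)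

theorem foldl_max_mem (L : List Int) : ∀ c : Int, L.foldl max c ∈ c :: L := by
  induction L with
  | nil => intro c; simp
  | cons a L ih =>
    intro c
    rcases List.mem_cons.mp (ih (max c a)) with h | h
    · rw [List.foldl_cons, h]
      rcases max_choice c a with hc | hc <;> rw [hc] <;> simp
    · rw [List.foldl_cons]
      exact List.mem_cons_of_mem _ (List.mem_cons_of_mem _ h)

-- foldl min is a lower bound of the seed and the list
theorem foldl_min_le (L : List Int) : ∀ c : Int, L.foldl min c ≤ c ∧ ∀ y ∈ L, L.foldl min c ≤ y := by
  induction L with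
  | nil => intro c; simp
  | cons a L ih =>
    intro c
    have h := ih (min c a)
    refine ⟨le_trans h.1 (min_le_left _ _), ?_⟩
    intro y hy
    rcases List.mem_cons.mp hy with rfl | hy
    · exact le_trans h.1 (min_le_right _ _)
    · exact h.2 y hy

theorem le_foldl_max (L : List Int) : ∀ c : Int, c ≤ L.foldl max c ∧ ∀ y ∈ L, y ≤ L.foldl max c := by
  induction L with
  | nil => intro c; simp
  | cons a L ih =>
    intro c
    have h := ih (max c a)
    refine ⟨le_trans (le_max_left _ _) h.1, ?_⟩
    intro y hy
    rcases List.mem_cons.mp hy with rfl | hy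
    · exact le_trans (le_max_right _ _) h.1
    · exact h.2 y hy

-- a ≤-pairwise list is bounded above by its last element
theorem pairwise_le_getLast : ∀ (S : List Int) (h : S ≠ []), S.Pairwise (· ≤ ·) →
    ∀ y ∈ S, y ≤ S.getLast h := by
  intro S
  induction S with
  | nil => intro h; exact absurd rfl h
  | cons a S ih =>
    intro hne hp y hy
    by_cases hS : S = []
    · subst hS
      simp only [List.mem_singleton] at hy
      subst hy
      simp
    · rw [List.getLast_cons hS]
      rcases List.mem_cons.mp hy with rfl | hy
      · exact (List.pairwise_cons.mp hp).1 _ (List.getLast_mem hS)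
      · exact ih hS (List.pairwise_cons.mp hp).2 y hy

theorem foldl_min_eq_of_bounds (L : List Int) (c m : Int) (hmem : m ∈ L)
    (hlb : ∀ y ∈ L, m ≤ y) (hc : m ≤ c) : L.foldl min c = m := by
  have h1 := foldl_min_le L c
  have h2 : m ≤ L.foldl min c := by
    rcases List.mem_cons.mp (foldl_min_mem L c) with h | h
    · rw [h]; exact hc
    · exact hlb _ h
  exact le_antisymm (h1.2 m hmem) h2

theorem foldl_max_eq_of_bounds (L : List Int) (c M : Int) (hmem : M ∈ L)
    (hub : ∀ y ∈ L, y ≤ M) (hc : c ≤ M) : L.foldl max c = M := by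
  have h1 := le_foldl_max L c
  have h2 : L.foldl max c ≤ M := by
    rcases List.mem_cons.mp (foldl_max_mem L c) with h | h
    · rw [h]; exact hc
    · exact hub _ h
  exact le_antisymm h2 (h1.2 M hmem)

-- A's fold, with generalized accumulators, computes the running min/max/length of pvPortVals.
theorem portparser_fold_eq (ts : List (List Char)) : ∀ (sm lg c : Int),
    ts.foldl
      (fun (st : Int × Int × Int) port =>
        if 0 < port.length then
          let v := (PySem.Int.ofChars? port).getD 0
          let smallest := if v < st.1 then v else st.1
          let largest := if v > st.2.1 then v else st.2.1
          (smallest, largest, st.2.2 + 1)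
        else st)
      (sm, lg, c)
    = (((ts.filter (fun p => p ≠ [])).map (fun p => (PySem.Int.ofChars? p).getD 0)).foldl min sm,
       ((ts.filter (fun p => p ≠ [])).map (fun p => (PySem.Int.ofChars? p).getD 0)).foldl max lg,
       c + ((ts.filter (fun p => p ≠ [])).map (fun p => (PySem.Int.ofChars? p).getD 0)).length) := by
  induction ts with
  | nil => intro sm lg c; simp
  | cons t ts ih =>
    intro sm lg c
    by_cases ht : t = []
    · subst ht; simpa using ih sm lg c
    · have hlen : 0 < t.length := List.length_pos_iff.mpr ht
      have hfil : (t :: ts).filter (fun p => p ≠ []) = t :: ts.filter (fun p => p ≠ []) := by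
        simp [ht]
      simp only [List.foldl_cons, if_pos hlen, hfil, List.map_cons, List.length_cons]
      rw [ih]
      simp only [Prod.mk.injEq]
      refine ⟨?_, ?_, ?_⟩
      · congr 1; omega
      · congr 1; omega
      · push_cast; ring

-- the three components of A over pvPortVals s
theorem port_parser_eq_minmax (s : String) :
    port_parser s = ((pvPortVals s).foldl max (-1), (pvPortVals s).foldl min 66000,
      ((pvPortVals s).length : Int)) := by
  unfold port_parser pvPortVals
  rw [portparser_fold_eq]
  simp

-- B written over pvPortVals (definitional)
theorem port_parser_alt_eq (s : String) :
    port_parser_alt s =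
      if PySem.List.sorted (pvPortVals s) (fun x => x) false = [] then ((-1 : Int), (66000 : Int), (0 : Int))
      else ((PySem.List.pyGet? (PySem.List.sorted (pvPortVals s) (fun x => x) false) (-1)).getD 0,
            (PySem.List.pyGet? (PySem.List.sorted (pvPortVals s) (fun x => x) false) 0).getD 0,
            ((PySem.List.sorted (pvPortVals s) (fun x => x) false).length : Int)) := rfl

theorem sorted_head_getLast (s : String) (h : pvPortVals s ≠ []) :
    ∃ m M : Int, m ∈ pvPortVals s ∧ M ∈ pvPortVals s ∧
      (∀ y ∈ pvPortVals s, m ≤ y) ∧ (∀ y ∈ pvPortVals s, y ≤ M) ∧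
      port_parser_alt s = (M, m, ((pvPortVals s).length : Int)) := by
  have hperm : (PySem.List.sorted (pvPortVals s) (fun x => x) false).Perm (pvPortVals s) :=
    PySem.List.sorted_perm _ _ _
  have hSne : PySem.List.sorted (pvPortVals s) (fun x => x) false ≠ [] := by
    intro hnil
    have hlen := hperm.length_eq
    rw [hnil] at hlen
    exact h (List.length_eq_zero_iff.mp hlen.symm)
  obtain ⟨m, t, hcons⟩ := List.exists_cons_of_ne_nil hSne
  have hpair : (PySem.List.sorted (pvPortVals s) (fun x => x) false).Pairwise (· ≤ ·) := by
    simpa using PySem.List.sorted_pairwise (pvPortVals s) (fun x => x)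
  refine ⟨m, (PySem.List.sorted (pvPortVals s) (fun x => x) false).getLast hSne, ?_, ?_, ?_, ?_, ?_⟩
  · exact hperm.mem_iff.mp (hcons ▸ List.mem_cons_self)
  · exact hperm.mem_iff.mp (List.getLast_mem hSne)
  · intro y hy
    exact PySem.List.key_head_sorted_le (pvPortVals s) (fun x => x) hcons y hy
  · intro y hy
    exact pairwise_le_getLast _ hSne hpair y (hperm.mem_iff.mpr hy)
  · rw [port_parser_alt_eq s, if_neg hSne, PySem.List.pyGet?_neg_one, PySem.List.pyGet?_zero,
      List.getLast?_eq_some_getLast hSne]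
    rw [hperm.length_eq]
    simp [hcons]

-- ===== VERDICT (by name: the statement is the Claim_ definition above) =====
theorem port_parser_spec : Claim_unchanged_port_parser := by
  intro s _ hpre hnd
  rw [D_iff s hpre] at hnd
  rw [port_parser_eq_minmax, port_parser_alt_eq]
  by_cases h : pvPortVals s = []
  · rw [h]
    rfl
  · obtain ⟨m, M, hm, hM, hlb, hub, halt⟩ := sorted_head_getLast s h
    rw [port_parser_alt_eq] at halt
    rw [halt]
    have hnot : ¬ ((∀ v ∈ pvPortVals s, v < -1) ∨ (∀ v ∈ pvPortVals s, 66000 < v)) := by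
      intro hor; exact hnd ⟨h, hor⟩
    push_neg at hnot
    obtain ⟨⟨a, ha, ha2⟩, ⟨b, hb, hb2⟩⟩ := hnot
    have hM1 : -1 ≤ M := le_trans ha2 (hub a ha)
    have hm1 : m ≤ 66000 := le_trans (hlb b hb) hb2
    rw [foldl_max_eq_of_bounds _ _ _ hM hub hM1, foldl_min_eq_of_bounds _ _ _ hm hlb hm1]

theorem port_parser_changed : Claim_changed_port_parser := by
  unfold Claim_changed_port_parser; decide

theorem port_parser_tight : Claim_exact_port_parser := by
  intro s _ hpre hd
  rw [D_iff s hpre] at hd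
  obtain ⟨hne, hor⟩ := hd
  obtain ⟨m, M, hm, hM, hlb, hub, halt⟩ := sorted_head_getLast s hne
  rw [port_parser_eq_minmax, halt]
  rcases hor with hall | hall
  · -- all values < -1: A's largest is clamped to -1, B's is M < -1
    have hclamp : (pvPortVals s).foldl max (-1) = -1 := by
      rcases List.mem_cons.mp (foldl_max_mem (pvPortVals s) (-1)) with h | h
      · exact h
      · exact absurd ((le_foldl_max (pvPortVals s) (-1)).1) (not_le.mpr (hall _ h))
    intro heq
    have h1 := congrArg Prod.fst heq
    simp only [hclamp] at h1
    have h2 := hall M hM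
    omega
  · -- all values > 66000: A's smallest is clamped to 66000, B's is m > 66000
    have hclamp : (pvPortVals s).foldl min 66000 = 66000 := by
      rcases List.mem_cons.mp (foldl_min_mem (pvPortVals s) 66000) with h | h
      · exact h
      · exact absurd ((foldl_min_le (pvPortVals s) 66000).1) (not_le.mpr (hall _ h))
    intro heq
    have h1 := congrArg (fun p : Int × Int × Int => p.2.1) heq
    simp only [hclamp] at h1
    have h2 := hall m hm
    omega
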